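-- pv_equiv track=rewrite | github.com/johntnanney/gradience | gradience/peft_utils.py | create_complete_rank_pattern
-- ===== SOURCE A (Python) =====
-- def normalize_peft_module_name(name: str) -> str:
--     """
--     Normalize module names for PEFT compatibility.
--
--     PEFT expects module names without wrapper prefixes that are added by
--     various model loading mechanisms. This function strips common prefixes
--     to ensure rank_pattern and alpha_pattern keys match what PEFT sees.
--
--     Args:
--         name: Module name that may include wrapper prefixes
--
--     Returns:
--         Normalized module name compatible with PEFT
--
--     Examples:
--         >>> normalize_peft_module_name("base_model.model.bert.encoder.layer.0.attention.self.query")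
--         "bert.encoder.layer.0.attention.self.query"
--         >>> normalize_peft_module_name("model.transformer.h.0.attn.c_attn")
--         "transformer.h.0.attn.c_attn"
--         >>> normalize_peft_module_name("distilbert.transformer.layer.0.attention.q_lin")
--         "distilbert.transformer.layer.0.attention.q_lin"
--     """
--     for prefix in ("base_model.model.", "base_model.", "model."):
--         if name.startswith(prefix):
--             name = name[len(prefix):]
--     return name
--
-- def normalize_rank_pattern(rank_pattern: dict) -> dict:
--     """
--     Normalize all module names in a rank_pattern for PEFT compatibility.
--
--     Args:
--         rank_pattern: Dictionary mapping module names to ranks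
--
--     Returns:
--         Dictionary with normalized module names
--     """
--     return {
--         normalize_peft_module_name(name): rank
--         for name, rank in rank_pattern.items()
--     }
--
-- def create_complete_rank_pattern(
--     partial_rank_pattern: dict,
--     audit_layers: list,
--     default_rank: int
-- ) -> dict:
--     """
--     Create a complete rank pattern that includes ALL target modules.
--
--     PEFT's rank_pattern has compatibility issues when not all modules are explicitly listed.
--     This function ensures every target module from the audit has an explicit rank.
--
--     Current approach (conservative, for PEFT 0.18.1 compatibility):
--     - Creates explicit entries for ALL modules, not just overrides
--     - Works around PEFT issues where default_r > some pattern ranks fails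
--     - Results in larger patterns but guarantees correct application
--
--     Future cleaner approach (once PEFT improves):
--     - Use max(pattern_ranks) as default_r
--     - Only include modules that differ from default
--     - Would reduce pattern size significantly
--
--     Args:
--         partial_rank_pattern: Partial rank pattern (typically from audit per-layer suggestions)
--         audit_layers: List of audit layer objects with 'name' field
--         default_rank: Rank to use for modules not in partial_rank_pattern
--
--     Returns:
--         Complete rank pattern with normalized module names
--     """
--     # Normalize the partial pattern first
--     normalized_partial = normalize_rank_pattern(partial_rank_pattern)
--
--     # Create complete pattern by adding default ranks for missing modules
--     complete_pattern = {}
--     for layer in audit_layers: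
--         module_name = normalize_peft_module_name(layer["name"])
--         if module_name in normalized_partial:
--             # Use the specified rank
--             complete_pattern[module_name] = normalized_partial[module_name]
--         else:
--             # Use default rank for modules not explicitly specified
--             complete_pattern[module_name] = default_rank
--
--     return complete_pattern
-- ===== SOURCE B (Python) =====
-- def normalize_peft_module_name(name: str) -> str:
--     for prefix in ("base_model.model.", "base_model.", "model."):
--         if name.startswith(prefix):
--             name = name[len(prefix):]
--     return name
--
-- def normalize_rank_pattern(rank_pattern: dict) -> dict:
--     return {
--         normalize_peft_module_name(name): rank
--         for name, rank in rank_pattern.items()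
--     }
--
-- def create_complete_rank_pattern(partial_rank_pattern: dict, audit_layers: list, default_rank: int) -> dict:
--     # Defaults table first, then overlay the partial entries onto existing keys only.
--     complete_pattern = {
--         normalize_peft_module_name(layer["name"]): default_rank
--         for layer in audit_layers
--     }
--     for name, rank in normalize_rank_pattern(partial_rank_pattern).items():
--         if name in complete_pattern:
--             complete_pattern[name] = rank
--     return complete_pattern
-- ===== Notes on version B (the rewrite author's own statement) =====
-- stated objective: alternative
-- what changed: B builds the complete pattern as a defaults table (one comprehension over the audit layers, no per-layer membership test) and then overlays the normalized partial pattern onto keys already present, instead of A's per-layer branch looking each module up in the normalized partial.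
import Mathlib
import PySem

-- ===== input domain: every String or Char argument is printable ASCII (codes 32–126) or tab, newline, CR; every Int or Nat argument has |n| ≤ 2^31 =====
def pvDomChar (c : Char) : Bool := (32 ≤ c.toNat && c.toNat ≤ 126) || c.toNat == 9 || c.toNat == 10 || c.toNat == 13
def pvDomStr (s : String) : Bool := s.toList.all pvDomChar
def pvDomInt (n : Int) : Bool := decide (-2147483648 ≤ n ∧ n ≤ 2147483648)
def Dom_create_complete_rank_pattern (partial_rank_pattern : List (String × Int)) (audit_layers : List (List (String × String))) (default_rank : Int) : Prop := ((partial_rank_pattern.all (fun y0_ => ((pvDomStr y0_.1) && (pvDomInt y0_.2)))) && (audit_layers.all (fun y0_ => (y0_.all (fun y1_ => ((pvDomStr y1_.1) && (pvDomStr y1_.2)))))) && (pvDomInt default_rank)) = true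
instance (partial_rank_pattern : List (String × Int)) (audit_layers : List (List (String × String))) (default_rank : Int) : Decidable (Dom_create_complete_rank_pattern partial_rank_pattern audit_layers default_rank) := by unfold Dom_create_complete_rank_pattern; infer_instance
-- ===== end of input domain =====

-- B replaces A's per-layer membership branch by a defaults table overlaid with the partial entries that hit existing keys (alternative decomposition, same cost).

-- ===== PORT A =====
-- shared module-level helper; name[len(prefix):] after a successful startswith is List.drop (exact, the prefix length is within the string)
def normalize_peft_module_name (name : String) : String :=
  String.ofList ((["base_model.model.", "base_model.", "model."].map String.toList).foldl
    (fun cs p => if PySem.Chars.startswith cs p then cs.drop p.length else cs) name.toList)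

-- shared module-level helper (dict comprehension = insert-fold over the items)
def normalize_rank_pattern (rank_pattern : PySem.Dict String Int) : PySem.Dict String Int :=
  rank_pattern.items.foldl (fun d p => d.insert (normalize_peft_module_name p.1) p.2) PySem.Dict.empty

def create_complete_rank_pattern (partial_rank_pattern : List (String × Int)) (audit_layers : List (List (String × String))) (default_rank : Int) : List (String × Int) :=
  let normalized_partial := normalize_rank_pattern (PySem.Dict.ofList partial_rank_pattern)
  let complete_pattern := audit_layers.foldl (fun d layer =>
    match (PySem.Dict.ofList layer).get? "name" with
    | none => d   -- layer["name"]: Python raises KeyError here; excluded by Pre_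
    | some nm =>
      let module_name := normalize_peft_module_name nm
      match normalized_partial.get? module_name with
      | some r => d.insert module_name r
      | none => d.insert module_name default_rank) PySem.Dict.empty
  complete_pattern.items

-- ===== PORT B =====
def create_complete_rank_pattern_alt (partial_rank_pattern : List (String × Int)) (audit_layers : List (List (String × String))) (default_rank : Int) : List (String × Int) :=
  let complete_pattern := audit_layers.foldl (fun d layer =>
    match (PySem.Dict.ofList layer).get? "name" with
    | none => d   -- layer["name"]: Python raises KeyError here; excluded by Pre_
    | some nm => d.insert (normalize_peft_module_name nm) default_rank) PySem.Dict.empty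
  let final := (normalize_rank_pattern (PySem.Dict.ofList partial_rank_pattern)).items.foldl
    (fun d p => if d.contains p.1 then d.insert p.1 p.2 else d) complete_pattern
  final.items

-- ===== PRECONDITION & SPEC =====
-- Pre_ excludes exactly the inputs where some audit layer has no "name" key: Python A (and B) raise KeyError there.
def Pre_create_complete_rank_pattern (partial_rank_pattern : List (String × Int)) (audit_layers : List (List (String × String))) (default_rank : Int) : Prop :=
  audit_layers.all (fun layer => layer.any (fun p => p.1 == "name")) = true
instance (partial_rank_pattern : List (String × Int)) (audit_layers : List (List (String × String))) (default_rank : Int) : Decidable (Pre_create_complete_rank_pattern partial_rank_pattern audit_layers default_rank) := by unfold Pre_create_complete_rank_pattern; infer_instance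

def pvWitness_create_complete_rank_pattern : (List (String × Int)) × (List (List (String × String))) × Int :=
  ([("model.q", 3)], [[("name", "q")], [("name", "k")]], 5)

def Spec_create_complete_rank_pattern (partial_rank_pattern : List (String × Int)) (audit_layers : List (List (String × String))) (default_rank : Int) (out : List (String × Int)) : Prop := out = create_complete_rank_pattern_alt partial_rank_pattern audit_layers default_rank
instance (partial_rank_pattern : List (String × Int)) (audit_layers : List (List (String × String))) (default_rank : Int) (out : List (String × Int)) : Decidable (Spec_create_complete_rank_pattern partial_rank_pattern audit_layers default_rank out) := by unfold Spec_create_complete_rank_pattern; infer_instance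

-- ===== CLAIM (what is proved, stated in full; the proofs are below) =====
def Claim_equal_create_complete_rank_pattern : Prop := ∀ (partial_rank_pattern : List (String × Int)) (audit_layers : List (List (String × String))) (default_rank : Int), Dom_create_complete_rank_pattern partial_rank_pattern audit_layers default_rank → Pre_create_complete_rank_pattern partial_rank_pattern audit_layers default_rank → Spec_create_complete_rank_pattern partial_rank_pattern audit_layers default_rank (create_complete_rank_pattern partial_rank_pattern audit_layers default_rank)

-- ===== LEMMAS AND PROOFS =====

-- the (optional) normalized key a layer contributes
def pvKey? (layer : List (String × String)) : Option String :=
  ((PySem.Dict.ofList layer).get? "name").map normalize_peft_module_name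

-- generic shape of both audit folds: insert pvKey? with a key-determined value
def pvFoldIns (f : String → Int) (ls : List (List (String × String))) (d : PySem.Dict String Int) : PySem.Dict String Int :=
  ls.foldl (fun d layer => match pvKey? layer with
    | none => d
    | some m => d.insert m (f m)) d

-- B's overlay loop and the "last value for key j" it realises
def pvOverlay (d : PySem.Dict String Int) (ps : List (String × Int)) : PySem.Dict String Int :=
  ps.foldl (fun d p => if d.contains p.1 then d.insert p.1 p.2 else d) d

def pvLast (ps : List (String × Int)) (j : String) (v : Int) : Int :=
  ps.foldl (fun a p => if p.1 = j then p.2 else a) v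

lemma pvLast_of_not_mem (ps : List (String × Int)) (j : String) (v : Int) (h : j ∉ ps.map Prod.fst) :
    pvLast ps j v = v := by
  induction ps generalizing v with
  | nil => rfl
  | cons p ps ih =>
    simp only [List.map_cons, List.mem_cons, not_or] at h
    have hne : p.1 ≠ j := fun he => h.1 he.symm
    simp only [pvLast, List.foldl_cons, if_neg hne]
    exact ih v h.2

lemma pvLast_nodup (ps : List (String × Int)) (j : String) (w v : Int)
    (hnd : (ps.map Prod.fst).Nodup) (hm : (j, w) ∈ ps) : pvLast ps j v = w := by
  induction ps generalizing v with
  | nil => simp at hm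
  | cons p ps ih =>
    simp only [List.map_cons, List.nodup_cons] at hnd
    rcases List.mem_cons.1 hm with h | h
    · subst h
      simp only [pvLast, List.foldl_cons]
      exact pvLast_of_not_mem ps j w hnd.1
    · have hne : p.1 ≠ j := by
        intro he
        exact hnd.1 (he ▸ (List.mem_map.2 ⟨(j, w), h, rfl⟩))
      simp only [pvLast, List.foldl_cons, if_neg hne]
      exact ih v hnd.2 h


lemma keys_insert_add (d : PySem.Dict String Int) (m : String) (v : Int) :
    (d.insert m v).keys = PySem.Set.add d.keys m := by
  by_cases h : d.contains m = true
  · rw [PySem.Dict.keys_insert_of_contains _ _ h,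
      PySem.Set.add_of_mem ((PySem.Dict.contains_iff_mem_keys _ _).1 h)]
  · rw [PySem.Dict.keys_insert_of_not_contains _ _ (by simpa using h),
      PySem.Set.add_of_not_mem (fun hm => h ((PySem.Dict.contains_iff_mem_keys _ _).2 hm))]

lemma pvFoldIns_getD (f : String → Int) (ls : List (List (String × String))) (d : PySem.Dict String Int) (j : String) (d0 : Int) :
    (pvFoldIns f ls d).getD j d0 = if (∃ l ∈ ls, pvKey? l = some j) then f j else d.getD j d0 := by
  induction ls generalizing d with
  | nil => simp [pvFoldIns]
  | cons l ls ih =>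
    simp only [pvFoldIns, List.foldl_cons] at *
    rw [ih]
    by_cases hex : (∃ l' ∈ ls, pvKey? l' = some j)
    · simp [hex, List.mem_cons]
    · cases hk : pvKey? l with
      | none =>
        simp only [hk]
        simp [hex, List.mem_cons, hk]
      | some m =>
        by_cases hjm : j = m
        · subst hjm
          simp [hex, hk, PySem.Dict.getD_insert]
        · simp only [hk]
          simp [hex, PySem.Dict.getD_insert, hjm, hk]
          intro h
          exact absurd h.symm hjm

lemma pvFoldIns_keys (f : String → Int) (ls : List (List (String × String))) (d : PySem.Dict String Int) :
    (pvFoldIns f ls d).keys = PySem.Set.update d.keys (ls.filterMap pvKey?) := by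
  induction ls generalizing d with
  | nil => simp [pvFoldIns, PySem.Set.update]
  | cons l ls ih =>
    simp only [pvFoldIns, List.foldl_cons, List.filterMap_cons] at *
    cases hk : pvKey? l with
    | none => simp [ih]
    | some m => rw [ih, keys_insert_add, PySem.Set.update_cons]

lemma pvOverlay_keys (ps : List (String × Int)) (d : PySem.Dict String Int) :
    (pvOverlay d ps).keys = d.keys := by
  induction ps generalizing d with
  | nil => rfl
  | cons p ps ih =>
    simp only [pvOverlay, List.foldl_cons] at *
    by_cases h : d.contains p.1 = true
    · rw [if_pos h, ih, PySem.Dict.keys_insert_of_contains _ _ h]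
    · rw [if_neg h, ih]

lemma pvOverlay_getD (ps : List (String × Int)) (d : PySem.Dict String Int) (j : String) (d0 : Int) :
    (pvOverlay d ps).getD j d0 = if d.contains j then pvLast ps j (d.getD j d0) else d.getD j d0 := by
  induction ps generalizing d with
  | nil => simp [pvOverlay, pvLast]
  | cons p ps ih =>
    simp only [pvOverlay, pvLast, List.foldl_cons] at *
    by_cases hc : d.contains p.1 = true
    · rw [if_pos hc, ih]
      have hcj : (d.insert p.1 p.2).contains j = d.contains j := by
        rw [PySem.Dict.contains_insert]
        by_cases h : j = p.1
        · subst h; simp [hc]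
        · simp [h]
      rw [hcj]
      by_cases hj : d.contains j = true
      · rw [if_pos hj, if_pos hj]
        congr 1
        rw [PySem.Dict.getD_insert]
        by_cases hpj : j = p.1
        · subst hpj; simp
        · rw [if_neg hpj, if_neg (fun h => hpj h.symm)]
      · rw [if_neg hj, if_neg hj, PySem.Dict.getD_insert,
          if_neg (fun h : j = p.1 => hj (h ▸ hc))]
    · rw [if_neg hc, ih]
      by_cases hj : d.contains j = true
      · rw [if_pos hj, if_pos hj]
        congr 1
        rw [if_neg (fun h : p.1 = j => hc (by rw [h]; exact hj))]
      · rw [if_neg hj, if_neg hj]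

lemma pv_main_eq (partial_rank_pattern : List (String × Int)) (audit_layers : List (List (String × String))) (default_rank : Int) :
    create_complete_rank_pattern partial_rank_pattern audit_layers default_rank
      = create_complete_rank_pattern_alt partial_rank_pattern audit_layers default_rank := by
  unfold create_complete_rank_pattern create_complete_rank_pattern_alt
  set np := normalize_rank_pattern (PySem.Dict.ofList partial_rank_pattern) with hnpdef
  set fA := fun m => (np.get? m).getD default_rank with hfA
  have hA : (audit_layers.foldl (fun d layer =>
      match (PySem.Dict.ofList layer).get? "name" with
      | none => d
      | some nm =>
        let module_name := normalize_peft_module_name nm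
        match np.get? module_name with
        | some r => d.insert module_name r
        | none => d.insert module_name default_rank) PySem.Dict.empty)
      = pvFoldIns fA audit_layers PySem.Dict.empty := by
    unfold pvFoldIns
    congr 1
    funext d layer
    unfold pvKey?
    cases (PySem.Dict.ofList layer).get? "name" with
    | none => rfl
    | some nm =>
      dsimp only
      cases h : np.get? (normalize_peft_module_name nm) <;> simp [hfA, h]
  have hD : (audit_layers.foldl (fun d layer =>
      match (PySem.Dict.ofList layer).get? "name" with
      | none => d
      | some nm => d.insert (normalize_peft_module_name nm) default_rank) PySem.Dict.empty)
      = pvFoldIns (fun _ => default_rank) audit_layers PySem.Dict.empty := by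
    unfold pvFoldIns
    congr 1
    funext d layer
    unfold pvKey?
    cases (PySem.Dict.ofList layer).get? "name" <;> rfl
  simp only [hA, hD]
  set dA := pvFoldIns fA audit_layers PySem.Dict.empty with hdA
  set dD := pvFoldIns (fun _ => default_rank) audit_layers PySem.Dict.empty with hdD
  show dA.items = (pvOverlay dD np.items).items
  have hkA : dA.keys = PySem.Set.update ([] : List String) (audit_layers.filterMap pvKey?) := by
    rw [hdA, pvFoldIns_keys, PySem.Dict.keys_empty]
  have hkD : dD.keys = PySem.Set.update ([] : List String) (audit_layers.filterMap pvKey?) := by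
    rw [hdD, pvFoldIns_keys, PySem.Dict.keys_empty]
  have hkB : (pvOverlay dD np.items).keys = dD.keys := pvOverlay_keys _ _
  have hndA : dA.keys.Nodup := by
    rw [hkA]; exact PySem.Set.nodup_update _ _ List.nodup_nil
  have hndB : (pvOverlay dD np.items).keys.Nodup := by
    rw [hkB, hkD]; exact PySem.Set.nodup_update _ _ List.nodup_nil
  have hknp : np.keys.Nodup := by
    rw [hnpdef]
    unfold normalize_rank_pattern
    exact PySem.Dict.nodup_keys_foldl_insert_key _ _ _ _
      (by rw [PySem.Dict.keys_empty]; exact List.nodup_nil)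
  have hitems : np.items.map Prod.fst = np.keys := rfl
  have hgd : ∀ j, dA.getD j 0 = (pvOverlay dD np.items).getD j 0 := by
    intro j
    rw [pvOverlay_getD, hdA, pvFoldIns_getD]
    have hcD : dD.contains j = true ↔ (∃ l ∈ audit_layers, pvKey? l = some j) := by
      rw [PySem.Dict.contains_iff_mem_keys _ _, hkD, PySem.Set.mem_update]
      simp [List.mem_filterMap]
    by_cases hex : ∃ l ∈ audit_layers, pvKey? l = some j
    · rw [if_pos hex, if_pos (hcD.2 hex)]
      have hdDj : dD.getD j 0 = default_rank := by
        rw [hdD, pvFoldIns_getD, if_pos hex]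
      rw [hdDj]
      cases h : np.get? j with
      | some w =>
        have hm := PySem.Dict.mem_items_of_get?_eq_some _ h
        rw [pvLast_nodup _ _ _ _ (hitems ▸ hknp) hm, hfA]
        simp [h]
      | none =>
        have hnm : j ∉ np.items.map Prod.fst := by
          rw [hitems]
          exact (PySem.Dict.get?_eq_none_iff_not_mem_keys _ _).1 h
        rw [pvLast_of_not_mem _ _ _ hnm, hfA]
        simp [h]
    · rw [if_neg hex, if_neg (fun h => hex (hcD.1 h)), hdD, pvFoldIns_getD, if_neg hex]
  rw [PySem.Dict.items_eq_map_keys dA hndA 0,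
    PySem.Dict.items_eq_map_keys (pvOverlay dD np.items) hndB 0, hkB, hkD, ← hkA]
  apply List.map_congr_left
  intro k _
  rw [hgd k]

-- ===== VERDICT (by name: the statement is the Claim_ definition above) =====
theorem create_complete_rank_pattern_spec : Claim_equal_create_complete_rank_pattern := by
  intro partial_rank_pattern audit_layers default_rank _ _
  exact pv_main_eq partial_rank_pattern audit_layers default_rank
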